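-- pv_equiv track=rewrite | github.com/iam-mj/1stProject_SD | radixsort8.py | transf16
-- ===== SOURCE A (Python) =====
-- def transf16(element):
--     list = []
--     if element == 0:
--         list = [0]
--     while element:
--         list.append(element % (1 << 16)) #element % (2 ** 16)
--         element = element >> 16
--     return list #intoarce o lista cu cifrele numarului in noua baza dar de la final la inceput
-- ===== SOURCE B (Python) =====
-- def transf16(element):
--     n = max(1, (element.bit_length() + 15) // 16)
--     return [(element >> (16 * i)) & 0xFFFF for i in range(n)]
-- ===== Notes on version B (the rewrite author's own statement) =====
-- stated objective: alternative
-- what changed: Replaces the destructive peel-and-test while loop by an up-front digit-count from bit_length followed by independent per-index shift-and-mask extraction in a comprehension.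
import Mathlib
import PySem

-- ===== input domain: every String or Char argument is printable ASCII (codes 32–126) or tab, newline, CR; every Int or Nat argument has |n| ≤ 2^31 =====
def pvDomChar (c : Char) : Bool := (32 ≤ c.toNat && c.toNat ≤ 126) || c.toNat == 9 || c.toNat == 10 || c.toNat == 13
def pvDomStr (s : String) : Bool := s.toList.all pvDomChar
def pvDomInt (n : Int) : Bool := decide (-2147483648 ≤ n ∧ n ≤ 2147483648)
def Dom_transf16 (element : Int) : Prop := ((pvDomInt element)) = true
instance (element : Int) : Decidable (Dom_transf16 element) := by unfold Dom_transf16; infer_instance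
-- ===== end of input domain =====

-- ===== PORT A =====
-- B replaces A's destructive peel-and-test loop by bit_length digit counting plus
-- indexed shift-and-mask extraction; equal on all element ≥ 0 (A loops forever on negatives).

-- A's while loop: peels element % 2^16 and shifts; the '0 < element' guard only makes the
-- recursion total — Python A never returns on negatives (it diverges), excluded by Pre_.
def transf16Go (element : Int) (l : List Int) : List Int :=
  if h0 : element = 0 then l
  else if h : 0 < element then
    transf16Go (PySem.Int.floordiv element 65536) (l ++ [PySem.Int.mod element 65536])
  else l
termination_by element.toNat
decreasing_by
  have h1 : PySem.Int.floordiv element 65536 = element / 65536 :=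
    PySem.Int.floordiv_eq_ediv_of_pos (by omega)
  rw [h1]
  omega

def transf16 (element : Int) : List Int :=
  transf16Go element (if element = 0 then [0] else [])

-- ===== PORT B =====
def transf16_alt (element : Int) : List Int :=
  let n := max 1 ((PySem.Int.bitLength element + 15) / 16)
  (List.range n).map (fun i => PySem.Int.band (PySem.Int.floordiv element (2 ^ (16 * i))) 0xFFFF)

-- ===== PRECONDITION & SPEC =====
-- Pre_ excludes negative inputs: Python A's while loop never terminates there (an arithmetic
-- right shift of a negative number stays negative forever), so A returns no value on them.
def Pre_transf16 (element : Int) : Prop := 0 ≤ element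
instance (element : Int) : Decidable (Pre_transf16 element) := by unfold Pre_transf16; infer_instance
def pvWitness_transf16 : Int := (70000)
def Spec_transf16 (element : Int) (out : List Int) : Prop := out = transf16_alt element
instance (element : Int) (out : List Int) : Decidable (Spec_transf16 element out) := by unfold Spec_transf16; infer_instance

-- ===== CLAIM (what is proved, stated in full; the proofs are below) =====
def Claim_equal_transf16 : Prop := ∀ (element : Int), Dom_transf16 element → Pre_transf16 element → Spec_transf16 element (transf16 element)

-- ===== LEMMAS AND PROOFS =====

-- reference digit list, little-endian base 2^16
def auxDigits (m : Nat) : List Int :=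
  if m = 0 then [] else ((m % 65536 : Nat) : Int) :: auxDigits (m / 65536)

lemma transf16Go_eq (m : Nat) : ∀ acc, transf16Go (m : Int) acc = acc ++ auxDigits m := by
  induction m using Nat.strong_induction_on with
  | _ m ih =>
    intro acc
    rw [transf16Go, auxDigits]
    by_cases h0 : m = 0
    · simp [h0]
    · have hm : (0:Int) < (m:Int) := by exact_mod_cast Nat.pos_of_ne_zero h0
      have hne : (m:Int) ≠ 0 := by omega
      have hfd : PySem.Int.floordiv (m : Int) 65536 = ((m / 65536 : Nat) : Int) := by
        exact_mod_cast PySem.Int.floordiv_natCast m 65536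
      have hmd : PySem.Int.mod (m : Int) 65536 = ((m % 65536 : Nat) : Int) := by
        exact_mod_cast PySem.Int.mod_natCast m 65536
      simp only [hne, hm, dif_neg, dif_pos, if_pos, hfd, hmd, h0, if_neg, not_false_iff]
      rw [ih (m / 65536) (Nat.div_lt_self (Nat.pos_of_ne_zero h0) (by norm_num)) _]
      simp

-- Nat-level view of B's per-index digit
lemma digit_eq (m i : Nat) :
    PySem.Int.band (PySem.Int.floordiv (m : Int) (2 ^ (16 * i))) 0xFFFF
      = ((m / 2 ^ (16 * i) % 65536 : Nat) : Int) := by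
  have hfd : PySem.Int.floordiv (m : Int) (2 ^ (16 * i)) = ((m / 2 ^ (16 * i) : Nat) : Int) := by
    have := PySem.Int.floordiv_natCast m (2 ^ (16 * i))
    rw [← this]
    norm_cast
  rw [hfd]
  have hb : PySem.Int.band ((m / 2 ^ (16 * i) : Nat) : Int) ((65535 : Nat) : Int)
      = (((m / 2 ^ (16 * i)) &&& 65535 : Nat) : Int) := PySem.Int.band_natCast _ _
  have h65535 : ((65535 : Nat) : Int) = 0xFFFF := by norm_num
  rw [← h65535, hb]
  congr 1
  have h2 : (65535 : Nat) = 2 ^ 16 - 1 := by norm_num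
  rw [h2, Nat.and_two_pow_sub_one_eq_mod]

-- Nat bit_length of m, via the Int primitive
lemma bitLength_lt_iff (m k : Nat) : m < 2 ^ k ↔ PySem.Int.bitLength (m : Int) ≤ k := by
  constructor
  · intro h
    by_contra hc
    push_neg at hc
    have h2 : 2 ^ (PySem.Int.bitLength (m:Int) - 1) ≤ ((m:Int)).natAbs := by
      apply PySem.Int.two_pow_bitLength_le
      intro h0
      rw [h0] at hc
      simp [PySem.Int.bitLength_zero] at hc
    simp only [Int.natAbs_natCast] at h2
    have h3 : 2 ^ k ≤ 2 ^ (PySem.Int.bitLength (m:Int) - 1) :=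
      Nat.pow_le_pow_right (by norm_num) (by omega)
    omega
  · intro h
    have h1 : ((m:Int)).natAbs < 2 ^ PySem.Int.bitLength (m:Int) := PySem.Int.lt_two_pow_bitLength _
    simp only [Int.natAbs_natCast] at h1
    calc m < 2 ^ PySem.Int.bitLength (m:Int) := h1
      _ ≤ 2 ^ k := Nat.pow_le_pow_right (by norm_num) h

lemma bitLength_div_two (m : Nat) (h : 0 < m) :
    PySem.Int.bitLength (m : Int) = PySem.Int.bitLength ((m / 2 : Nat) : Int) + 1 :=
  PySem.Int.bitLength_natCast h

lemma bitLength_div65536 (m : Nat) (h : 65536 ≤ m) :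
    PySem.Int.bitLength ((m / 65536 : Nat) : Int) = PySem.Int.bitLength (m : Int) - 16 := by
  have key : ∀ k m : Nat, 2 ^ k ≤ m →
      PySem.Int.bitLength ((m / 2 ^ k : Nat) : Int) = PySem.Int.bitLength (m : Int) - k := by
    intro k
    induction k with
    | zero => intro m _; simp
    | succ k ih =>
      intro m hm
      have hm0 : 0 < m := lt_of_lt_of_le (Nat.two_pow_pos (k + 1)) hm
      have h1 : m / 2 ^ (k + 1) = (m / 2) / 2 ^ k := by
        rw [Nat.pow_succ, Nat.mul_comm, ← Nat.div_div_eq_div_mul]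
      have h2 : 2 ^ k ≤ m / 2 := by
        rw [Nat.le_div_iff_mul_le (by norm_num)]
        calc 2 ^ k * 2 = 2 ^ (k + 1) := by ring
          _ ≤ m := hm
      have hblk : k < PySem.Int.bitLength ((m / 2 : Nat) : Int) := by
        by_contra hc
        push_neg at hc
        have := (bitLength_lt_iff (m / 2) k).mpr hc
        omega
      rw [h1, ih (m / 2) h2, bitLength_div_two m hm0]
      omega
  have hk := key 16 m (by norm_num; omega)
  norm_num at hk
  exact hk

lemma alt_main (m : Nat) (h : 0 < m) :
    (List.range (max 1 ((PySem.Int.bitLength (m : Int) + 15) / 16))).map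
      (fun i => ((m / 2 ^ (16 * i) % 65536 : Nat) : Int)) = auxDigits m := by
  induction m using Nat.strong_induction_on with
  | _ m ih =>
    have hbl1 : 1 ≤ PySem.Int.bitLength (m : Int) := by
      by_contra hc
      push_neg at hc
      have := (bitLength_lt_iff m 0).mpr (by omega)
      omega
    by_cases hs : m < 65536
    · have hble : PySem.Int.bitLength (m : Int) ≤ 16 := (bitLength_lt_iff m 16).mp (by norm_num; omega)
      have hn : max 1 ((PySem.Int.bitLength (m : Int) + 15) / 16) = 1 := by omega
      rw [hn]
      have hd : m / 65536 = 0 := Nat.div_eq_of_lt hs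
      rw [auxDigits, if_neg h.ne', auxDigits, if_pos hd]
      norm_num [List.range_one, Nat.mod_eq_of_lt hs]
      omega
    · push_neg at hs
      have hbl17 : 17 ≤ PySem.Int.bitLength (m : Int) := by
        by_contra hc
        push_neg at hc
        have := (bitLength_lt_iff m 16).mpr (by omega)
        omega
      have hrec := bitLength_div65536 m hs
      set bl := PySem.Int.bitLength (m : Int) with hbl
      have hn : max 1 ((bl + 15) / 16) = ((bl - 16 + 15) / 16) + 1 := by omega
      have hn' : max 1 ((PySem.Int.bitLength ((m / 65536 : Nat) : Int) + 15) / 16)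
          = (bl - 16 + 15) / 16 := by
        rw [hrec]
        omega
      rw [hn, List.range_succ_eq_map, List.map_cons, List.map_map]
      rw [auxDigits, if_neg (by omega)]
      congr 1
      · norm_num
      · have hstep : ∀ i : Nat, m / 2 ^ (16 * (i + 1)) = (m / 65536) / 2 ^ (16 * i) := by
          intro i
          rw [Nat.mul_add, Nat.mul_one, Nat.pow_add, Nat.mul_comm (2 ^ (16 * i)), ← Nat.div_div_eq_div_mul]
        have hih := ih (m / 65536) (Nat.div_lt_self h (by norm_num))
          (Nat.div_pos hs (by norm_num))
        rw [hn'] at hih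
        rw [← hih]
        apply List.map_congr_left
        intro i _
        simp [Function.comp, hstep i]

-- ===== VERDICT (by name: the statement is the Claim_ definition above) =====
theorem transf16_spec : Claim_equal_transf16 := by
  intro element _ hpre
  unfold Pre_transf16 at hpre
  unfold Spec_transf16 transf16 transf16_alt
  obtain ⟨m, rfl⟩ : ∃ m : Nat, element = (m : Int) := ⟨element.toNat, by omega⟩
  rw [transf16Go_eq]
  by_cases h0 : m = 0
  · subst h0
    simp [auxDigits]
    decide
  · have hm : ¬ ((m:Int) = 0) := by exact_mod_cast h0
    simp only [hm, if_false, List.nil_append]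
    rw [← alt_main m (Nat.pos_of_ne_zero h0)]
    apply List.map_congr_left
    intro i _
    exact (digit_eq m i).symm
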